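-- pv_equiv track=rewrite | github.com/chalos18/COSC-Studies | COSC262/final exam revision/quiz1.py | dumbo_func
-- ===== SOURCE A (Python) =====
-- def dumbo_func(data, index=0):
--     """Takes a list of numbers and does weird stuff with it"""
--     if index >= len(data):
--         return 0
--     else:
--         if (data[index] // 100) % 3 != 0:
--             return 1 + dumbo_func(data, index + 1)
--         else:
--             return dumbo_func(data, index + 1)
-- ===== SOURCE B (Python) =====
-- def dumbo_func(data, index=0):
--     """Takes a list of numbers and does weird stuff with it"""
--     count = 0
--     for i in range(index, len(data)):
--         if (data[i] // 100) % 3 != 0: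
--             count += 1
--     return count
-- ===== Notes on version B (the rewrite author's own statement) =====
-- stated objective: simpler
-- what changed: Replaces the index recursion with a single explicit for-loop over range(index, len(data)) accumulating a counter, so there is no recursion (and no recursion-depth limit).
import Mathlib
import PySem

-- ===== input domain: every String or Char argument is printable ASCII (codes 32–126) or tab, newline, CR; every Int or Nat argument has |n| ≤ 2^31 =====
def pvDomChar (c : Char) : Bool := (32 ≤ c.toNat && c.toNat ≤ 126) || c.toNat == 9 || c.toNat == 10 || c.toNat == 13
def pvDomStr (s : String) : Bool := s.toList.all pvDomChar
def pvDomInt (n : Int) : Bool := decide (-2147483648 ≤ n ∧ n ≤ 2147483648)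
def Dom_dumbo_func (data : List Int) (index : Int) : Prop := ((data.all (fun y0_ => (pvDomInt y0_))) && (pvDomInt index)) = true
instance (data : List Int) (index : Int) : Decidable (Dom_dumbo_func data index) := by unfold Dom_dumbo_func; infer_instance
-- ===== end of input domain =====

-- ===== PORT A =====
-- B replaces A's index recursion with one explicit counting loop over range(index, len(data)); same O(n) cost, plainer shape.
def dumbo_func (data : List Int) (index : Int) : Int :=
  if _h : index ≥ (data.length : Int) then 0
  else
    if PySem.Int.mod (PySem.Int.floordiv (PySem.List.pyGetD data index 0) 100) 3 ≠ 0 then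
      1 + dumbo_func data (index + 1)
    else
      dumbo_func data (index + 1)
termination_by ((data.length : Int) - index).toNat
decreasing_by all_goals omega

-- ===== PORT B =====
def dumbo_func_alt (data : List Int) (index : Int) : Int :=
  (PySem.List.pyRange index (data.length : Int) 1).foldl
    (fun count i =>
      if PySem.Int.mod (PySem.Int.floordiv (PySem.List.pyGetD data i 0) 100) 3 ≠ 0 then count + 1
      else count) 0

-- ===== PRECONDITION & SPEC =====
-- Pre_ excludes exactly the inputs where Python A raises IndexError: index < -len(data)
-- (the recursion then reads data[index] with an out-of-range negative index; B raises there too).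
def Pre_dumbo_func (data : List Int) (index : Int) : Prop := -(data.length : Int) ≤ index
instance (data : List Int) (index : Int) : Decidable (Pre_dumbo_func data index) := by unfold Pre_dumbo_func; infer_instance
def pvWitness_dumbo_func : List Int × Int := ([150, 300, 250], 0)
def Spec_dumbo_func (data : List Int) (index : Int) (out : Int) : Prop := out = dumbo_func_alt data index
instance (data : List Int) (index : Int) (out : Int) : Decidable (Spec_dumbo_func data index out) := by unfold Spec_dumbo_func; infer_instance

-- ===== CLAIM (what is proved, stated in full; the proofs are below) =====
def Claim_equal_dumbo_func : Prop := ∀ (data : List Int) (index : Int), Dom_dumbo_func data index → Pre_dumbo_func data index → Spec_dumbo_func data index (dumbo_func data index)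

-- ===== LEMMAS AND PROOFS =====

-- the loop of B with any starting accumulator c equals c plus A's recursive count from index
theorem dumbo_loop_eq (data : List Int) :
    ∀ (n : Nat) (index : Int), ((data.length : Int) - index).toNat = n →
    ∀ (c : Int),
      (PySem.List.pyRange index (data.length : Int) 1).foldl
        (fun count i =>
          if PySem.Int.mod (PySem.Int.floordiv (PySem.List.pyGetD data i 0) 100) 3 ≠ 0 then count + 1
          else count) c = c + dumbo_func data index := by
  intro n
  induction n with
  | zero =>
    intro index hn c
    have hge : index ≥ (data.length : Int) := by omega
    rw [PySem.List.pyRange_one_eq_nil hge, dumbo_func]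
    simp [hge]
  | succ k ih =>
    intro index hn c
    have hlt : index < (data.length : Int) := by omega
    rw [PySem.List.pyRange_one_cons hlt, List.foldl_cons, dumbo_func]
    have hk : ((data.length : Int) - (index + 1)).toNat = k := by omega
    simp only [not_le.mpr hlt, dite_eq_ite, if_false]
    by_cases hcond : PySem.Int.mod (PySem.Int.floordiv (PySem.List.pyGetD data index 0) 100) 3 ≠ 0
    · rw [if_pos hcond, if_pos hcond, ih (index + 1) hk (c + 1)]; ring
    · rw [if_neg hcond, if_neg hcond, ih (index + 1) hk c]

-- ===== VERDICT (by name: the statement is the Claim_ definition above) =====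
theorem dumbo_func_spec : Claim_equal_dumbo_func := by
  intro data index _ _
  unfold Spec_dumbo_func dumbo_func_alt
  rw [dumbo_loop_eq data ((data.length : Int) - index).toNat index rfl 0, zero_add]
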